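-- pv_equiv track=rewrite | github.com/PLSE-Lab/Python-MLAPI-expl | python_sources/12-features-kde-0-967-lb.py | digram_repetitions
-- ===== SOURCE A (Python) =====
-- def digram_repetitions(x):
--     s = set()
--     sum = 0
--     for i in range(len(x) - 1):
--         digram = x[i: i + 2]
--         if digram not in s:
--             sum += x.count(digram) - 1
--         s.add(digram)
--     return sum
-- ===== SOURCE B (Python) =====
-- def digram_repetitions(x):
--     # One pass: greedily count non-overlapping occurrences of every digram at once.
--     # A digram occurrence at i is part of the greedy (str.count) matching of its
--     # digram unless the previous position was counted for the very same digram,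
--     # which happens exactly when x[i-1:i+1] == x[i:i+2].
--     counts = {}
--     prev_counted = False
--     for i in range(len(x) - 1):
--         d = x[i:i + 2]
--         if prev_counted and x[i - 1:i + 1] == d:
--             prev_counted = False
--         else:
--             counts[d] = counts.get(d, 0) + 1
--             prev_counted = True
--     return sum(c - 1 for c in counts.values())
-- ===== Notes on version B (the rewrite author's own statement) =====
-- stated objective: alternative
-- what changed: A rescans the whole string with x.count for every fresh digram (nested scans); B makes one greedy left-to-right pass keeping a dict of non-overlapping digram counts (a single boolean handles the overlap rule for equal-letter digrams) and sums value-1 over the dict; B trades A's C-level count scans for a single Python-level pass, so it is asymptotically better in distinct-digram count but not measurably faster on the timed inputs.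
import Mathlib
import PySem

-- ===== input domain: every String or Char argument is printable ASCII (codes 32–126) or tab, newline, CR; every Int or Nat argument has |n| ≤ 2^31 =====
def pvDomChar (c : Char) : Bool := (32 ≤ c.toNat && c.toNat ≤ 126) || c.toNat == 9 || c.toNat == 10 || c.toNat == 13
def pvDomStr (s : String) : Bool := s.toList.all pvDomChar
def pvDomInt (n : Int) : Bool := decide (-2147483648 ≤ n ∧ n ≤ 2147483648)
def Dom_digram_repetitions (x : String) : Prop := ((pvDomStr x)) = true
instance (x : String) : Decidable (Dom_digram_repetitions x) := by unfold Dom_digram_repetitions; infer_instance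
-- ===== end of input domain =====

-- B replaces A's per-fresh-digram x.count rescans by one greedy left-to-right pass that
-- maintains every digram's non-overlapping count in a dict (objective: alternative algorithm).

-- ===== PORT A =====
def digram_repetitions (x : String) : Int :=
  ((PySem.List.pyRange 0 (PySem.Str.len x - 1) 1).foldl
    (fun (st : PySem.Set String × Int) (i : Int) =>
      let digram := PySem.Str.slice x (some i) (some (i + 2))
      let sum := if PySem.Set.contains st.1 digram then st.2
                 else st.2 + ((PySem.Str.count x digram : Int) - 1)
      (PySem.Set.add st.1 digram, sum))
    (PySem.Set.empty, 0)).2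

-- ===== PORT B =====
def digram_repetitions_alt (x : String) : Int :=
  let st := (PySem.List.pyRange 0 (PySem.Str.len x - 1) 1).foldl
    (fun (st : PySem.Dict String Int × Bool) (i : Int) =>
      let d := PySem.Str.slice x (some i) (some (i + 2))
      if st.2 && (PySem.Str.slice x (some (i - 1)) (some (i + 1)) == d) then
        (st.1, false)
      else
        (st.1.insert d (st.1.getD d 0 + 1), true))
    (PySem.Dict.empty, false)
  ((PySem.Dict.values st.1).map (fun c => c - 1)).sum

-- ===== PRECONDITION & SPEC =====
def Spec_digram_repetitions (x : String) (out : Int) : Prop := out = digram_repetitions_alt x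
instance (x : String) (out : Int) : Decidable (Spec_digram_repetitions x out) := by unfold Spec_digram_repetitions; infer_instance

-- ===== CLAIM (what is proved, stated in full; the proofs are below) =====
def Claim_equal_digram_repetitions : Prop := ∀ (x : String), Dom_digram_repetitions x → Spec_digram_repetitions x (digram_repetitions x)

-- ===== LEMMAS AND PROOFS =====

-- The digram starting at position k, as both ports slice it.
def pvSdg (x : String) (k : Nat) : String :=
  PySem.Str.slice x (some (k : Int)) (some ((k : Int) + 2))

-- Digrams of the first m positions, in position order.
def pvDgs (x : String) (m : Nat) : List String := (List.range m).map (pvSdg x)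

-- Greedy non-overlapping occurrence counter of d, walked position by position;
-- the flag says "the previous position was matched" (so this one may not overlap it).
def pvPcnt (d : List Char) : List Char → Bool → Nat
  | [], _ => 0
  | c :: t, b => if d.isPrefixOf (c :: t) ∧ b = false then pvPcnt d t true + 1 else pvPcnt d t false

-- The two loop bodies, named for the invariant lemmas.
def pvStepA (x : String) (st : PySem.Set String × Int) (i : Int) : PySem.Set String × Int :=
  let digram := PySem.Str.slice x (some i) (some (i + 2))
  let sum := if PySem.Set.contains st.1 digram then st.2
             else st.2 + ((PySem.Str.count x digram : Int) - 1)
  (PySem.Set.add st.1 digram, sum)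

def pvStepB (x : String) (st : PySem.Dict String Int × Bool) (i : Int) : PySem.Dict String Int × Bool :=
  let d := PySem.Str.slice x (some i) (some (i + 2))
  if st.2 && (PySem.Str.slice x (some (i - 1)) (some (i + 1)) == d) then
    (st.1, false)
  else
    (st.1.insert d (st.1.getD d 0 + 1), true)

theorem pvA_eq_fold (x : String) :
    digram_repetitions x =
      ((PySem.List.pyRange 0 (PySem.Str.len x - 1) 1).foldl (pvStepA x) (PySem.Set.empty, 0)).2 := rfl

theorem pvB_eq_fold (x : String) :
    digram_repetitions_alt x =
      ((((PySem.List.pyRange 0 (PySem.Str.len x - 1) 1).foldl (pvStepB x)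
          (PySem.Dict.empty, false)).1.values).map (fun c => c - 1)).sum := rfl

theorem pvSdg_toList (x : String) (k : Nat) :
    (pvSdg x k).toList = (x.toList.drop k).take 2 := by
  simp [pvSdg, PySem.Str.slice]
  rw [show ((k : Int) + 2) = ((k : Int) + ((2 : Nat) : Int)) by norm_num,
      PySem.List.slice_natCast_add]

theorem pvSdg_len (x : String) (k : Nat) (h : k + 2 ≤ x.toList.length) :
    (pvSdg x k).toList.length = 2 := by
  have h' : k + 2 ≤ x.length := by simpa using h
  rw [pvSdg_toList]
  simp [List.length_take, List.length_drop]; omega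

theorem pvPcnt_true (d : List Char) (c : Char) (t : List Char) :
    pvPcnt d (c :: t) true = pvPcnt d t false := by
  simp [pvPcnt]

theorem pvPcnt_short (d m : List Char) (b : Bool) (hd : d.length = 2) (hm : m.length ≤ 1) :
    pvPcnt d m b = 0 := by
  match m, hm with
  | [], _ => rfl
  | [c], _ =>
    have hnp : ¬ d.isPrefixOf [c] = true := by
      intro h
      have := (List.isPrefixOf_iff_prefix.mp h).length_le
      simp [hd] at this
    simp [pvPcnt, hnp]

theorem pvPcnt_step_eq (d : List Char) (c : Char) (rest : List Char)
    (hd : d.length = 2) (he : d = (c :: rest).take 2) :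
    pvPcnt d (c :: rest) false = pvPcnt d rest true + 1 := by
  have hp : d.isPrefixOf (c :: rest) = true :=
    List.isPrefixOf_iff_prefix.mpr (he ▸ List.take_prefix 2 (c :: rest))
  simp [pvPcnt, hp]

theorem pvPcnt_step_ne (d : List Char) (c : Char) (rest : List Char) (b : Bool)
    (hd : d.length = 2) (hne : d ≠ (c :: rest).take 2) :
    pvPcnt d (c :: rest) b = pvPcnt d rest false := by
  cases b
  · have hnp : ¬ d.isPrefixOf (c :: rest) = true := by
      intro h
      exact hne ((List.prefix_iff_eq_take.mp (List.isPrefixOf_iff_prefix.mp h)).trans (by rw [hd]))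
    simp [pvPcnt, hnp]
  · exact pvPcnt_true d c rest

theorem pvCountGo_eq (d : List Char) (hd : d.length = 2) :
    ∀ (fuel : Nat) (m : List Char) (acc : Nat), m.length ≤ fuel →
      PySem.Chars.count.go d fuel m acc = acc + pvPcnt d m false := by
  intro fuel
  induction fuel with
  | zero =>
    intro m acc hm
    have : m = [] := List.eq_nil_of_length_eq_zero (Nat.le_zero.mp hm)
    subst this
    rw [PySem.Chars.count.go]; rfl
  | succ fuel ih =>
    intro m acc hm
    cases m with
    | nil => simp [PySem.Chars.count.go, pvPcnt]
    | cons c t =>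
      rw [PySem.Chars.count.go]
      by_cases hp : d.isPrefixOf (c :: t) = true
      · rw [if_pos hp]
        rw [hd]
        have hlen : (List.drop 2 (c :: t)).length ≤ fuel := by
          simp at hm ⊢; omega
        rw [ih _ _ hlen]
        have h1 : pvPcnt d (c :: t) false = pvPcnt d t true + 1 := by
          simp [pvPcnt, hp]
        rw [h1]
        have h2 : pvPcnt d t true = pvPcnt d (List.drop 2 (c :: t)) false := by
          cases t with
          | nil => simp [pvPcnt]
          | cons c2 t2 => simp [pvPcnt_true]
        omega
      · rw [if_neg hp]
        rw [ih _ _ (by simp at hm ⊢; omega)]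
        have h1 : pvPcnt d (c :: t) false = pvPcnt d t false := by
          simp [pvPcnt, hp]
        rw [h1]

theorem pvCount_eq_pcnt (m d : List Char) (hd : d.length = 2) :
    PySem.Chars.count m d = pvPcnt d m false := by
  have hne : d.isEmpty = false := by cases d <;> simp_all
  rw [PySem.Chars.count]
  simp [hne, pvCountGo_eq d hd m.length m 0 (le_refl _)]

theorem pvAinv (x : String) (k : Nat) :
    (List.range k).foldl (fun (st : PySem.Set String × Int) (j : Nat) => pvStepA x st (j : Int)) (PySem.Set.empty, 0)
      = (PySem.Set.ofList (pvDgs x k),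
         ((PySem.Set.ofList (pvDgs x k)).map (fun d => ((PySem.Str.count x d : Int) - 1))).sum) := by
  induction k with
  | zero => rfl
  | succ k ih =>
    rw [List.range_succ, List.foldl_append, ih, List.foldl_cons, List.foldl_nil]
    have hdg : pvDgs x (k + 1) = pvDgs x k ++ [pvSdg x k] := by
      simp [pvDgs, List.range_succ]
    rw [hdg, PySem.Set.ofList_append_singleton]
    show pvStepA x _ (k : Int) = _
    unfold pvStepA pvSdg
    by_cases hmem : pvSdg x k ∈ PySem.Set.ofList (pvDgs x k)
    · have hm' : pvSdg x k ∈ pvDgs x k := (PySem.Set.mem_ofList _ _).mp hmem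
      simp only [pvSdg] at hmem hm'
      simp [hm']
    · have hm' : pvSdg x k ∉ pvDgs x k := fun h => hmem ((PySem.Set.mem_ofList _ _).mpr h)
      simp only [pvSdg] at hmem hm'
      simp [hm']

theorem pvBinv (x : String) (k : Nat) (hk : k ≤ x.toList.length - 1) :
    (((List.range k).foldl (fun (st : PySem.Dict String Int × Bool) (j : Nat) => pvStepB x st (j : Int)) (PySem.Dict.empty, false)).1.keys
        = PySem.Set.ofList (pvDgs x k))
    ∧ ((((List.range k).foldl (fun (st : PySem.Dict String Int × Bool) (j : Nat) => pvStepB x st (j : Int)) (PySem.Dict.empty, false)).2 = true) → 1 ≤ k)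
    ∧ ∀ d : String, d.toList.length = 2 →
        ((((List.range k).foldl (fun (st : PySem.Dict String Int × Bool) (j : Nat) => pvStepB x st (j : Int)) (PySem.Dict.empty, false)).1.getD d 0)
          + (pvPcnt d.toList (x.toList.drop k)
              ((((List.range k).foldl (fun (st : PySem.Dict String Int × Bool) (j : Nat) => pvStepB x st (j : Int)) (PySem.Dict.empty, false)).2)
                && (pvSdg x (k - 1) == d)) : Int)
          = (pvPcnt d.toList x.toList false : Int)) := by
  induction k with
  | zero =>
    refine ⟨by simp [pvDgs], by simp, ?_⟩
    intro d _
    simp [PySem.Dict.getD_empty]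
  | succ k ih =>
    have hk' : k ≤ x.toList.length - 1 := by omega
    obtain ⟨hkeys, hprev, hinv⟩ := ih hk'
    have hn2 : k + 2 ≤ x.toList.length := by omega
    have hkn : k < x.toList.length := by omega
    set l := x.toList with hl
    set st := (List.range k).foldl (fun (st : PySem.Dict String Int × Bool) (j : Nat) => pvStepB x st (j : Int)) (PySem.Dict.empty, false) with hst
    rw [List.range_succ, List.foldl_append, List.foldl_cons, List.foldl_nil]
    rw [← hst]
    have hEl : (pvSdg x k).toList = (l.drop k).take 2 := pvSdg_toList x k
    have hE2 : (pvSdg x k).toList.length = 2 := pvSdg_len x k hn2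
    have hdrop : l.drop k = l[k] :: l.drop (k + 1) := List.drop_eq_getElem_cons hkn
    have hEtake : (pvSdg x k).toList = (l[k] :: l.drop (k + 1)).take 2 := by rw [hEl, hdrop]
    -- digrams list extension
    have hdg : pvDgs x (k + 1) = pvDgs x k ++ [pvSdg x k] := by simp [pvDgs, List.range_succ]
    -- the step's own digram is pvSdg x k
    have hstep : pvStepB x st (k : Int) =
        if st.2 && (PySem.Str.slice x (some ((k : Int) - 1)) (some ((k : Int) + 1)) == pvSdg x k) then
          (st.1, false)
        else
          (st.1.insert (pvSdg x k) (st.1.getD (pvSdg x k) 0 + 1), true) := rfl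
    -- for d ≠ pvSdg x k, one position is simply consumed
    have hcons : ∀ (d : String), d.toList.length = 2 → d ≠ pvSdg x k → ∀ b,
        pvPcnt d.toList (l.drop k) b = pvPcnt d.toList (l.drop (k + 1)) false := by
      intro d hd2 hne b
      rw [hdrop]
      refine pvPcnt_step_ne _ _ _ _ hd2 ?_
      rw [← hdrop, ← hEl]
      intro h
      exact hne (String.toList_inj.mp h)
    by_cases hcond : (st.2 && (PySem.Str.slice x (some ((k : Int) - 1)) (some ((k : Int) + 1)) == pvSdg x k)) = true
    · -- blocked: previous position was counted with the same digram
      rw [hstep, if_pos hcond]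
      obtain ⟨hst2, hbeq⟩ := Bool.and_eq_true_iff.mp hcond
      have hk1 : 1 ≤ k := hprev hst2
      have hsl : PySem.Str.slice x (some ((k : Int) - 1)) (some ((k : Int) + 1)) = pvSdg x (k - 1) := by
        have e1 : (((k - 1 : Nat)) : Int) = (k : Int) - 1 := by omega
        have e3 : (k : Int) - 1 + 2 = (k : Int) + 1 := by ring
        rw [pvSdg, e1, e3]
      have hEprev : pvSdg x (k - 1) = pvSdg x k := by
        rw [← hsl]; exact eq_of_beq hbeq
      have hmemE : pvSdg x k ∈ pvDgs x k := by
        rw [← hEprev]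
        exact List.mem_map_of_mem (List.mem_range.mpr (by omega))
      refine ⟨?_, by simp, ?_⟩
      · rw [hdg, PySem.Set.ofList_append_singleton,
            PySem.Set.add_of_mem ((PySem.Set.mem_ofList _ _).mpr hmemE), hkeys]
      · intro d hd2
        simp only [Bool.false_and]
        have hflag : pvPcnt d.toList (l.drop (k + 1)) false
            = pvPcnt d.toList (l.drop k) (st.2 && (pvSdg x (k - 1) == d)) := by
          by_cases hdE : d = pvSdg x k
          · subst hdE
            rw [hst2, hEprev, beq_self_eq_true, Bool.and_true, hdrop, pvPcnt_true]
          · rw [hcons d hd2 hdE]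
        rw [hflag]
        exact hinv d hd2
    · -- not blocked: count this digram
      rw [hstep, if_neg hcond]
      refine ⟨?_, fun _ => by omega, ?_⟩
      · rw [hdg, PySem.Set.ofList_append_singleton]
        by_cases hmemE : pvSdg x k ∈ PySem.Set.ofList (pvDgs x k)
        · rw [PySem.Dict.keys_insert_of_contains st.1 _
              ((PySem.Dict.contains_iff_mem_keys _ _).mpr (hkeys ▸ hmemE)),
            hkeys, PySem.Set.add_of_mem hmemE]
        · have hc : st.1.contains (pvSdg x k) = false := by
            rw [Bool.eq_false_iff]
            intro h
            exact hmemE (hkeys ▸ (PySem.Dict.contains_iff_mem_keys _ _).mp h)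
          rw [PySem.Dict.keys_insert_of_not_contains st.1 _ hc, hkeys,
            PySem.Set.add_of_not_mem hmemE]
      · intro d hd2
        simp only [Nat.add_sub_cancel, Bool.true_and]
        by_cases hdE : d = pvSdg x k
        · subst hdE
          rw [PySem.Dict.getD_insert_self, beq_self_eq_true]
          have hflagE : (st.2 && (pvSdg x (k - 1) == pvSdg x k)) = false := by
            cases h2 : st.2
            · simp
            · have hk1 : 1 ≤ k := hprev h2
              have hsl : PySem.Str.slice x (some ((k : Int) - 1)) (some ((k : Int) + 1)) = pvSdg x (k - 1) := by
                have e1 : (((k - 1 : Nat)) : Int) = (k : Int) - 1 := by omega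
                have e3 : (k : Int) - 1 + 2 = (k : Int) + 1 := by ring
                rw [pvSdg, e1, e3]
              simp only [h2, Bool.true_and] at hcond ⊢
              rw [← hsl]
              exact Bool.eq_false_iff.mpr hcond
          have := hinv (pvSdg x k) hd2
          rw [hflagE] at this
          rw [hdrop, pvPcnt_step_eq _ _ _ hd2 hEtake] at this
          push_cast at this ⊢
          omega
        · rw [PySem.Dict.getD_insert_of_ne st.1 _ _ hdE]
          have hbne : (pvSdg x k == d) = false :=
            beq_eq_false_iff_ne.mpr (fun h => hdE h.symm)
          rw [hbne]
          have := hinv d hd2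
          rw [hcons d hd2 hdE] at this
          exact this

-- ===== VERDICT (by name: the statement is the Claim_ definition above) =====
theorem digram_repetitions_spec : Claim_equal_digram_repetitions := by
  intro x _
  unfold Spec_digram_repetitions
  rw [pvA_eq_fold, pvB_eq_fold]
  have hr : PySem.List.pyRange 0 (PySem.Str.len x - 1) 1
      = (List.range (x.toList.length - 1)).map (fun (j : Nat) => (j : Int)) := by
    rw [PySem.List.pyRange_one]
    have h1 : (PySem.Str.len x - 1 - 0).toNat = x.toList.length - 1 := by
      simp [PySem.Str.len_eq]
    rw [h1]
    simp
  rw [hr, List.foldl_map, List.foldl_map]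
  rw [pvAinv x (x.toList.length - 1)]
  obtain ⟨hkeys, -, hinv⟩ := pvBinv x (x.toList.length - 1) (le_refl _)
  rw [PySem.Dict.values_eq_map_keys _ (hkeys ▸ PySem.Set.nodup_ofList _) 0, hkeys, List.map_map]
  refine congrArg List.sum (List.map_congr_left ?_)
  intro d hd
  obtain ⟨j, hj, rfl⟩ : ∃ j, j < x.toList.length - 1 ∧ pvSdg x j = d := by
    obtain ⟨j, hj, rfl⟩ := List.mem_map.mp ((PySem.Set.mem_ofList _ _).mp hd)
    exact ⟨j, List.mem_range.mp hj, rfl⟩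
  have hd2 : (pvSdg x j).toList.length = 2 := pvSdg_len x j (by omega)
  have h := hinv (pvSdg x j) hd2
  rw [pvPcnt_short _ _ _ hd2
    (show (x.toList.drop (x.toList.length - 1)).length ≤ 1 by
      simp only [List.length_drop]; omega)] at h
  have hc : (PySem.Str.count x (pvSdg x j) : Int) = (pvPcnt (pvSdg x j).toList x.toList false : Int) := by
    have hcc : PySem.Str.count x (pvSdg x j) = pvPcnt (pvSdg x j).toList x.toList false := by
      rw [show PySem.Str.count x (pvSdg x j)
            = PySem.Chars.count x.toList (pvSdg x j).toList from rfl]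
      exact pvCount_eq_pcnt _ _ hd2
    rw [hcc]
  simp only [Function.comp]
  rw [hc]
  omega
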